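-- pv_equiv track=rewrite | github.com/Njion-v/DrinkScan | scr/cameras/extract_bill.py | match_and_combine_results
-- ===== SOURCE A (Python) =====
-- def match_and_combine_results(cam_results):
--     """
--     Match and combine results from multiple cameras without duplicating identical detections.
--     If a label appears in multiple cameras, take the highest quantity.
--
--     Args:
--         cam_results (list): List of dictionaries, where each dictionary contains the detection results from a camera.
--                             Each dictionary has the format {"label": quantity}.
--
--     Returns:
--         dict: A combined dictionary with labels and their highest detected quantities.
--     """
--     combined_results = {}
--
--     for cam_result in cam_results:
--         for label, quantity in cam_result.items():
--             if label in combined_results: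
--                 combined_results[label] = max(combined_results[label], quantity)
--             else:
--                 combined_results[label] = quantity
--
--     return combined_results
-- ===== SOURCE B (Python) =====
-- def match_and_combine_results(cam_results):
--     # Pass 1: group every detected quantity under its label (first-seen order).
--     table = {}
--     for cam_result in cam_results:
--         for label, quantity in cam_result.items():
--             table.setdefault(label, []).append(quantity)
--     # Pass 2: reduce each group to its maximum.
--     return {label: max(values) for label, values in table.items()}
-- ===== Notes on version B (the rewrite author's own statement) =====
-- stated objective: alternative
-- what changed: Replaces A's streaming running-max update of the result dict with a two-phase collect-then-reduce: first a grouping pass appending every quantity under its label, then a separate comprehension taking max per group.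
import Mathlib
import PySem

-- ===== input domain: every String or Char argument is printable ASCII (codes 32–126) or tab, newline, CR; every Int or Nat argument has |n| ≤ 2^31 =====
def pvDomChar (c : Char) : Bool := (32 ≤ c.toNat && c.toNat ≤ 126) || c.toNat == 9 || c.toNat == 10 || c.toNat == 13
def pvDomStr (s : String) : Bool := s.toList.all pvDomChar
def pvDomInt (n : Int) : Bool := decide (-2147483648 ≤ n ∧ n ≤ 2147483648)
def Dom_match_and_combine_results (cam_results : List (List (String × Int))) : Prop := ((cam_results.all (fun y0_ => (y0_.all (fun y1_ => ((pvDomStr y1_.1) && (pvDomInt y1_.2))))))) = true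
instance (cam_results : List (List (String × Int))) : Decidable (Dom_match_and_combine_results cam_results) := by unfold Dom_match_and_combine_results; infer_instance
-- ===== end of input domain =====

-- B replaces A's streaming running-max update with a collect-all-then-reduce structure
-- (pass 1 groups quantities per label, pass 2 takes each group's max); same cost, alternative decomposition.


-- ===== PORT A =====
-- streaming running max: combined[label] = max(combined[label], quantity) / quantity
def match_and_combine_results (cam_results : List (List (String × Int))) : List (String × Int) :=
  (cam_results.foldl
    (fun combined cam_result =>
      cam_result.foldl
        (fun combined p =>
          if combined.contains p.1 then
            combined.insert p.1 (max (combined.getD p.1 0) p.2)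
          else
            combined.insert p.1 p.2)
        combined)
    (PySem.Dict.empty : PySem.Dict String Int)).items

-- ===== PORT B =====
-- max(values) of a nonempty Python list (the 0 default is never used: groups are nonempty)
def pvMaxList (vs : List Int) : Int := (PySem.List.max? vs (fun y => y)).getD 0

def match_and_combine_results_alt (cam_results : List (List (String × Int))) : List (String × Int) :=
  -- pass 1: table.setdefault(label, []).append(quantity)
  let table := cam_results.foldl
    (fun table cam_result =>
      cam_result.foldl (fun table p => table.modify p.1 [] (· ++ [p.2])) table)
    (PySem.Dict.empty : PySem.Dict String (List Int))
  -- pass 2: {label: max(values) for label, values in table.items()}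
  table.items.map (fun kv => (kv.1, pvMaxList kv.2))

-- ===== PRECONDITION & SPEC =====
def Spec_match_and_combine_results (cam_results : List (List (String × Int))) (out : List (String × Int)) : Prop := out = match_and_combine_results_alt cam_results
instance (cam_results : List (List (String × Int))) (out : List (String × Int)) : Decidable (Spec_match_and_combine_results cam_results out) := by unfold Spec_match_and_combine_results; infer_instance

-- ===== CLAIM (what is proved, stated in full; the proofs are below) =====
def Claim_equal_match_and_combine_results : Prop := ∀ (cam_results : List (List (String × Int))), Dom_match_and_combine_results cam_results → Spec_match_and_combine_results cam_results (match_and_combine_results cam_results)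

-- ===== LEMMAS AND PROOFS =====

-- A's step on one (label, quantity) pair
def pvStepA (d : PySem.Dict String Int) (p : String × Int) : PySem.Dict String Int :=
  if d.contains p.1 then d.insert p.1 (max (d.getD p.1 0) p.2) else d.insert p.1 p.2

-- B's grouping step on one pair
def pvStepB (d : PySem.Dict String (List Int)) (p : String × Int) : PySem.Dict String (List Int) :=
  d.modify p.1 [] (· ++ [p.2])

theorem pvMaxList_append (vs : List Int) (q : Int) (h : vs ≠ []) :
    pvMaxList (vs ++ [q]) = max (pvMaxList vs) q := by
  cases vs with
  | nil => exact absurd rfl h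
  | cons x t =>
      simp [pvMaxList, PySem.List.max?_id_cons, List.foldl_append]

-- the loop invariant relating A's dict to B's grouping table
def pvInv (dA : PySem.Dict String Int) (dB : PySem.Dict String (List Int)) : Prop :=
  dA.keys = dB.keys ∧ dB.keys.Nodup ∧
  (∀ k, dA.getD k 0 = pvMaxList (dB.getD k [])) ∧
  (∀ k, dB.contains k = true → dB.getD k [] ≠ [])

theorem pvInv_step (dA : PySem.Dict String Int) (dB : PySem.Dict String (List Int))
    (p : String × Int) (h : pvInv dA dB) : pvInv (pvStepA dA p) (pvStepB dB p) := by
  obtain ⟨hkeys, hnd, hmax, hne⟩ := h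
  have hcont : dA.contains p.1 = dB.contains p.1 := by
    rw [PySem.Dict.contains_eq_decide_mem_keys, PySem.Dict.contains_eq_decide_mem_keys, hkeys]
  by_cases hc : dB.contains p.1 = true
  · have hvs : dB.getD p.1 [] ≠ [] := hne p.1 hc
    refine ⟨?_, ?_, ?_, ?_⟩
    · simp only [pvStepA, pvStepB, PySem.Dict.modify, hcont, hc, if_pos]
      rw [PySem.Dict.keys_insert_of_contains _ _ hc,
          PySem.Dict.keys_insert_of_contains _ _ (by rw [hcont]; exact hc), hkeys]
    · simp only [pvStepB, PySem.Dict.modify]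
      exact PySem.Dict.nodup_keys_insert _ _ _ hnd
    · intro k
      simp only [pvStepA, pvStepB, PySem.Dict.modify, hcont, hc, if_pos,
        PySem.Dict.getD_insert]
      by_cases hk : k = p.1
      · simp [hk, hmax p.1, pvMaxList_append _ _ hvs]
      · simp [hk, hmax k]
    · intro k hk
      simp only [pvStepB, PySem.Dict.modify, PySem.Dict.getD_insert]
      by_cases hkp : k = p.1
      · simp [hkp]
      · simp only [if_neg hkp]
        apply hne
        simp only [pvStepB, PySem.Dict.modify, PySem.Dict.contains_insert] at hk
        simpa [hkp] using hk
  · have hcA : dA.contains p.1 = false := by rw [hcont]; simpa using hc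
    have hvs : dB.getD p.1 [] = [] := PySem.Dict.getD_of_not_contains _ _ (by simpa using hc)
    refine ⟨?_, ?_, ?_, ?_⟩
    · simp only [pvStepA, pvStepB, PySem.Dict.modify, hcA, if_neg, Bool.false_eq_true,
        not_false_iff]
      rw [PySem.Dict.keys_insert_of_not_contains _ _ hcA,
          PySem.Dict.keys_insert_of_not_contains _ _ (by simpa using hc), hkeys]
    · simp only [pvStepB, PySem.Dict.modify]
      exact PySem.Dict.nodup_keys_insert _ _ _ hnd
    · intro k
      simp only [pvStepA, pvStepB, PySem.Dict.modify, hcA, Bool.false_eq_true, if_false,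
        PySem.Dict.getD_insert]
      by_cases hk : k = p.1
      · simp [hk, hvs, pvMaxList, PySem.List.max?_id_cons]
      · simp [hk, hmax k]
    · intro k hk
      simp only [pvStepB, PySem.Dict.modify, PySem.Dict.getD_insert]
      by_cases hkp : k = p.1
      · simp [hkp, hvs]
      · simp only [if_neg hkp]
        apply hne
        simp only [pvStepB, PySem.Dict.modify, PySem.Dict.contains_insert] at hk
        simpa [hkp] using hk

theorem pvInv_foldl (ps : List (String × Int)) (dA : PySem.Dict String Int)
    (dB : PySem.Dict String (List Int)) (h : pvInv dA dB) :
    pvInv (ps.foldl pvStepA dA) (ps.foldl pvStepB dB) := by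
  induction ps generalizing dA dB with
  | nil => exact h
  | cons p t ih => exact ih _ _ (pvInv_step dA dB p h)

theorem pvInv_items (dA : PySem.Dict String Int) (dB : PySem.Dict String (List Int))
    (h : pvInv dA dB) : dA.items = dB.items.map (fun kv => (kv.1, pvMaxList kv.2)) := by
  obtain ⟨hkeys, hnd, hmax, _⟩ := h
  rw [PySem.Dict.items_eq_map_keys dA (hkeys ▸ hnd) 0,
      PySem.Dict.items_eq_map_keys dB hnd [], hkeys, List.map_map]
  exact List.map_congr_left (fun k _ => by simp [Function.comp, hmax k])

-- ===== VERDICT (by name: the statement is the Claim_ definition above) =====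
theorem match_and_combine_results_spec : Claim_equal_match_and_combine_results := by
  intro cam_results _
  unfold Spec_match_and_combine_results match_and_combine_results match_and_combine_results_alt
  have hA : ∀ d, cam_results.foldl
      (fun combined cam_result => cam_result.foldl
        (fun combined p =>
          if combined.contains p.1 then combined.insert p.1 (max (combined.getD p.1 0) p.2)
          else combined.insert p.1 p.2) combined) d
      = cam_results.flatten.foldl pvStepA d := by
    intro d; rw [List.foldl_flatten]; rfl
  have hB : ∀ d, cam_results.foldl
      (fun table cam_result => cam_result.foldl (fun table p => table.modify p.1 [] (· ++ [p.2])) table) d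
      = cam_results.flatten.foldl pvStepB d := by
    intro d; rw [List.foldl_flatten]; rfl
  rw [hA, hB]
  exact (pvInv_items _ _ (pvInv_foldl cam_results.flatten PySem.Dict.empty PySem.Dict.empty
    ⟨by simp [PySem.Dict.keys_empty], by simp [PySem.Dict.keys_empty], fun k => by rw [PySem.Dict.getD_empty, PySem.Dict.getD_empty]; rfl, fun k hk => by simp [PySem.Dict.contains_empty] at hk⟩))
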